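-- pv_equiv track=rewrite | github.com/MrNameless10/LA-ll | Torneio 01/formula1.py | formula1
-- ===== SOURCE A (Python) =====
-- def formula1(log):
--     d = {}
--     l = []
--     minn = {}
--
--     if log==[]:
--         return []
--
--     log.sort(key=lambda x: (x[1], x[0]))
--
--     for (tempo,nome) in log:
--         d[nome] = []
--
--     for (tempo,nome) in log:
--
--         d[nome].append(tempo)
--
--
--     for pessoa in d:
--         if(len(d[pessoa]) == 1):
--            minn[pessoa] = d[pessoa][0]
--         else:
--            minn[pessoa] = 100
--            for i in range(len(d[pessoa])-1):
--               if(   ((d[pessoa][i+1]) - d[pessoa][i]) < minn[pessoa]):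
--                  minn[pessoa] = (d[pessoa][i+1] - d[pessoa][i])
--
--
--
--
--     minval = min(minn.values())
--     l = [k for k,v in minn.items() if v==minval]
--
--
--     return sorted(l)
-- ===== SOURCE B (Python) =====
-- def formula1(log):
--     log.sort(key=lambda x: (x[1], x[0]))
--     if not log:
--         return []
--     value = {}
--     last = {}
--     count = {}
--     for (tempo, nome) in log:
--         c = count.get(nome, 0)
--         if c == 0:
--             value[nome] = tempo
--         elif c == 1:
--             value[nome] = min(100, tempo - last[nome])
--         else:
--             value[nome] = min(value[nome], tempo - last[nome])
--         last[nome] = tempo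
--         count[nome] = c + 1
--     minval = min(value.values())
--     return sorted(k for k, v in value.items() if v == minval)
-- ===== Notes on version B (the rewrite author's own statement) =====
-- stated objective: alternative
-- what changed: A builds per-name time lists in a dict (two passes) and then rescans each list with an index loop to find the min consecutive gap; B makes one streaming pass over the sorted log keeping value/last/count dicts, updating the running min gap incrementally, so the per-name lists and the inner index loop disappear.
import Mathlib
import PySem

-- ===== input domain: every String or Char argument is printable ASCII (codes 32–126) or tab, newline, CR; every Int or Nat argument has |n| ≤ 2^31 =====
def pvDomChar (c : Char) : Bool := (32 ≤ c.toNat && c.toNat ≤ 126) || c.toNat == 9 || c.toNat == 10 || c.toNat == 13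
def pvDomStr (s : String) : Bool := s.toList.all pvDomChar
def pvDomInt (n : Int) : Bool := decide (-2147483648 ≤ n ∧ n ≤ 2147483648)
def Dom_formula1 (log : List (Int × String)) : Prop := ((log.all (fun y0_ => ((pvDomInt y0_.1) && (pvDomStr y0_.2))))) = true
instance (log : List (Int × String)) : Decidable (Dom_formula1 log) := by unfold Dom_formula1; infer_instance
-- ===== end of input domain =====

-- B replaces A's group-then-rescan (per-name time lists + inner index loop) by one streaming pass
-- with value/last/count dicts; equivalence is about the RETURN value (both Pythons sort `log` in place).

-- ===== PORT A =====
-- for pessoa: minn[pessoa]=100; for i in range(len-1): if gap < minn[pessoa]: minn[pessoa] = gap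
-- (the inner loop threads the dict `minn` itself, as the Python does; the indices 0, i and i+1 are
-- always in range here, so pyGetD's default 0 is never used)
def aMinnBody (m : PySem.Dict String Int) (pessoa : String) (ts : List Int) : PySem.Dict String Int :=
  if ts.length = 1 then
    m.insert pessoa (PySem.List.pyGetD ts 0 0)
  else
    (PySem.List.pyRange 0 ((ts.length : Int) - 1) 1).foldl
      (fun m i =>
        if PySem.List.pyGetD ts (i + 1) 0 - PySem.List.pyGetD ts i 0 < m.getD pessoa 0 then
          m.insert pessoa (PySem.List.pyGetD ts (i + 1) 0 - PySem.List.pyGetD ts i 0)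
        else m)
      (m.insert pessoa 100)

def formula1 (log : List (Int × String)) : List String :=
  if log = [] then []
  else
    let s := PySem.List.sorted2 log (fun x => x.2) (fun x => x.1)
    let d : PySem.Dict String (List Int) :=
      s.foldl (fun d p => d.insert p.2 []) PySem.Dict.empty
    let d := s.foldl (fun d p => d.modify p.2 [] (· ++ [p.1])) d
    let minn : PySem.Dict String Int :=
      d.keys.foldl (fun m pessoa => aMinnBody m pessoa (d.getD pessoa [])) PySem.Dict.empty
    match PySem.List.min? minn.values (fun v => v) with
    | none => []   -- unreachable: log ≠ [] gives minn at least one value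
    | some minval =>
        PySem.List.sorted ((minn.items.filter (fun kv => kv.2 == minval)).map (·.1)) (fun x => x) false

-- ===== PORT B =====
-- state = (value, last, count); last[nome] is present whenever c ≥ 1, so getD's default 0 is never used
def bStep (st : PySem.Dict String Int × PySem.Dict String Int × PySem.Dict String Int)
    (p : Int × String) :
    PySem.Dict String Int × PySem.Dict String Int × PySem.Dict String Int :=
  let value := st.1
  let last := st.2.1
  let count := st.2.2
  let c := count.getD p.2 0
  let value :=
    if c = 0 then value.insert p.2 p.1
    else if c = 1 then value.insert p.2 (min 100 (p.1 - last.getD p.2 0))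
    else value.insert p.2 (min (value.getD p.2 0) (p.1 - last.getD p.2 0))
  (value, last.insert p.2 p.1, count.insert p.2 (c + 1))

def formula1_alt (log : List (Int × String)) : List String :=
  let s := PySem.List.sorted2 log (fun x => x.2) (fun x => x.1)
  if log = [] then []
  else
    let value := (s.foldl bStep (PySem.Dict.empty, PySem.Dict.empty, PySem.Dict.empty)).1
    match PySem.List.min? value.values (fun v => v) with
    | none => []   -- unreachable: log ≠ [] gives value at least one value
    | some minval =>
        PySem.List.sorted ((value.items.filter (fun kv => kv.2 == minval)).map (·.1)) (fun x => x) false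

-- ===== PRECONDITION & SPEC =====
def Spec_formula1 (log : List (Int × String)) (out : List String) : Prop := out = formula1_alt log
instance (log : List (Int × String)) (out : List String) : Decidable (Spec_formula1 log out) := by unfold Spec_formula1; infer_instance

-- ===== CLAIM (what is proved, stated in full; the proofs are below) =====
def Claim_equal_formula1 : Prop := ∀ (log : List (Int × String)), Dom_formula1 log → Spec_formula1 log (formula1 log)

-- ===== LEMMAS AND PROOFS =====

-- names occurring in s, first occurrences in order (= the key order of every dict both programs build)
def pvNames (s : List (Int × String)) : List String := PySem.Set.ofList (s.map (·.2))

-- the times of name n, in the order they occur in s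
def pvTimes (n : String) (s : List (Int × String)) : List Int :=
  (s.filter (fun p => p.2 == n)).map (·.1)

-- consecutive gaps of a time list
def pvGaps : List Int → List Int
  | [] => []
  | [_] => []
  | a :: b :: t => (b - a) :: pvGaps (b :: t)

-- the per-name value A stores in minn (and B maintains incrementally)
def pvF (ts : List Int) : Int :=
  if ts.length = 1 then ts.getD 0 0
  else (pvGaps ts).foldl (fun cur g => if g < cur then g else cur) 100

theorem pvTimes_append_singleton (n : String) (s : List (Int × String)) (p : Int × String) :
    pvTimes n (s ++ [p]) = pvTimes n s ++ (if p.2 == n then [p.1] else []) := by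
  simp only [pvTimes, List.filter_append, List.map_append]
  by_cases h : p.2 == n <;> simp [h]

theorem pvTimes_nil_iff (n : String) (s : List (Int × String)) :
    pvTimes n s = [] ↔ n ∉ pvNames s := by
  simp only [pvTimes, pvNames, PySem.Set.mem_ofList, List.map_eq_nil_iff,
    List.filter_eq_nil_iff, List.mem_map]
  constructor
  · rintro h ⟨p, hp, rfl⟩
    exact h p hp (by simp)
  · intro h p hp hb
    exact h ⟨p, hp, by simpa using hb⟩

theorem pvGaps_append (ts : List Int) (t : Int) (h : ts ≠ []) :
    pvGaps (ts ++ [t]) = pvGaps ts ++ [t - ts.getLastD 0] := by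
  induction ts with
  | nil => simp at h
  | cons a rest ih =>
      cases rest with
      | nil => simp [pvGaps]
      | cons b t' =>
          have := ih (by simp)
          simp only [List.cons_append, pvGaps] at this ⊢
          rw [this]
          simp [List.getLastD]

theorem pvF_singleton (t : Int) : pvF [t] = t := by simp [pvF]

theorem pvF_pair (t0 t : Int) : pvF [t0, t] = min 100 (t - t0) := by
  have h : ([t0, t] : List Int).length ≠ 1 := by simp
  rw [pvF, if_neg h]
  simp only [pvGaps, List.foldl_cons, List.foldl_nil]
  split_ifs <;> omega

theorem pvF_append (ts : List Int) (t : Int) (h : 2 ≤ ts.length) :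
    pvF (ts ++ [t]) = min (pvF ts) (t - ts.getLastD 0) := by
  have hne : ts ≠ [] := by intro h'; subst h'; simp at h
  have h1 : (ts ++ [t]).length ≠ 1 := by simp; omega
  have h2 : ts.length ≠ 1 := by omega
  unfold pvF
  rw [if_neg h1, if_neg h2, pvGaps_append ts t hne, List.foldl_append]
  simp only [List.foldl_cons, List.foldl_nil]
  split_ifs <;> omega

-- ===== A-side characterisation =====

theorem set_update_self (xs : List String) :
    PySem.Set.update (PySem.Set.ofList xs) xs = PySem.Set.ofList xs := by
  rw [PySem.Set.update_eq_append_filter]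
  have h : (PySem.Set.ofList xs).filter
      (fun y => !(PySem.Set.contains (PySem.Set.ofList xs) y)) = [] := by
    rw [List.filter_eq_nil_iff]
    intro a ha
    have hm : a ∈ xs := (PySem.Set.mem_ofList xs a).1 ha
    simp [PySem.Set.mem_ofList, hm]
  rw [h, List.append_nil]

theorem aInit_getD (s : List (Int × String)) (d : PySem.Dict String (List Int)) (n : String)
    (h : d.getD n [] = []) :
    (s.foldl (fun d p => d.insert p.2 ([] : List Int)) d).getD n [] = [] := by
  induction s generalizing d with
  | nil => simpa using h
  | cons p rest ih =>
      simp only [List.foldl_cons]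
      exact ih _ (by rw [PySem.Dict.getD_insert]; split <;> simp [h])

theorem aGroup_getD (s : List (Int × String)) (n : String) :
    ((s.foldl (fun d p => d.modify p.2 [] (· ++ [p.1]))
        (s.foldl (fun d p => d.insert p.2 ([] : List Int)) PySem.Dict.empty)).getD n [])
      = pvTimes n s := by
  have hswap : ∀ (d : PySem.Dict String (List Int)),
      s.foldl (fun d p => d.modify p.2 [] (· ++ [p.1])) d
        = (s.map (fun p => (p.2, p.1))).foldl (fun d p => d.modify p.1 [] (· ++ [p.2])) d := by
    intro d; rw [List.foldl_map]
  rw [hswap, PySem.Dict.getD_foldl_modify_append,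
    aInit_getD s PySem.Dict.empty n (by simp)]
  simp only [pvTimes, List.filter_map, List.map_map]
  rfl

theorem aGroup_keys (s : List (Int × String)) :
    (s.foldl (fun d p => d.modify p.2 [] (· ++ [p.1]))
        (s.foldl (fun d p => d.insert p.2 ([] : List Int)) PySem.Dict.empty)).keys
      = pvNames s := by
  unfold pvNames
  rw [PySem.Dict.keys_foldl_modify_key, PySem.Dict.keys_foldl_insert_key,
    PySem.Dict.keys_empty, PySem.Set.update_nil_left]
  exact set_update_self _

-- the inner index loop over the dict equals one insert of the plain Int fold
theorem aMinn_inner (idxs : List Int) (m : PySem.Dict String Int) (k : String)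
    (g : Int → Int) (c : Int) :
    idxs.foldl (fun m i => if g i < m.getD k 0 then m.insert k (g i) else m) (m.insert k c)
      = m.insert k (idxs.foldl (fun cur i => if g i < cur then g i else cur) c) := by
  induction idxs generalizing c with
  | nil => rfl
  | cons i rest ih =>
      simp only [List.foldl_cons, PySem.Dict.getD_insert_self]
      by_cases h : g i < c
      · rw [if_pos h, if_pos h, PySem.Dict.insert_insert_self, ih]
      · rw [if_neg h, if_neg h, ih]

-- the pyRange/pyGetD index loop computes the gaps fold (Nat-index core)
theorem aRange_core (xs : List Int) (a c : Int) :
    (List.range xs.length).foldl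
        (fun cur i => if (a :: xs).getD (i + 1) 0 - (a :: xs).getD i 0 < cur
          then (a :: xs).getD (i + 1) 0 - (a :: xs).getD i 0 else cur) c
      = (pvGaps (a :: xs)).foldl (fun cur g => if g < cur then g else cur) c := by
  induction xs generalizing a c with
  | nil => simp [pvGaps]
  | cons b t ih =>
      simp only [List.length_cons, List.range_succ_eq_map, List.foldl_cons, List.foldl_map,
        Nat.succ_eq_add_one, List.getD_cons_succ, List.getD_cons_zero, pvGaps]
      exact ih b _

theorem aRange_fold (ts : List Int) (c : Int) (h : ts ≠ []) :
    (PySem.List.pyRange 0 ((ts.length : Int) - 1) 1).foldl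
        (fun cur i => if PySem.List.pyGetD ts (i + 1) 0 - PySem.List.pyGetD ts i 0 < cur
          then PySem.List.pyGetD ts (i + 1) 0 - PySem.List.pyGetD ts i 0 else cur) c
      = (pvGaps ts).foldl (fun cur g => if g < cur then g else cur) c := by
  obtain ⟨a, xs, rfl⟩ := List.exists_cons_of_ne_nil h
  have hlen : ((a :: xs).length : Int) - 1 = (xs.length : Int) := by
    push_cast [List.length_cons]; ring
  rw [hlen, PySem.List.pyRange_zero_natCast, List.foldl_map]
  refine Eq.trans (PySem.List.foldl_congr_mem _ _ _ _ ?_) (aRange_core xs a c)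
  intro acc i _
  have h1 : ((i : Int) + 1) = ((i + 1 : Nat) : Int) := by push_cast; ring
  rw [h1, PySem.List.pyGetD_natCast, PySem.List.pyGetD_natCast]

theorem aMinnBody_eq (m : PySem.Dict String Int) (pessoa : String) (ts : List Int) (h : ts ≠ []) :
    aMinnBody m pessoa ts = m.insert pessoa (pvF ts) := by
  unfold aMinnBody pvF
  by_cases h1 : ts.length = 1
  · rw [if_pos h1, if_pos h1]
    obtain ⟨a, rfl⟩ := List.length_eq_one_iff.1 h1
    rfl
  · rw [if_neg h1, if_neg h1,
      aMinn_inner (PySem.List.pyRange 0 ((ts.length : Int) - 1) 1) m pessoa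
        (fun i => PySem.List.pyGetD ts (i + 1) 0 - PySem.List.pyGetD ts i 0) 100,
      aRange_fold ts 100 h]

theorem aMinn_items (s : List (Int × String)) :
    ((s.foldl (fun d p => d.modify p.2 [] (· ++ [p.1]))
        (s.foldl (fun d p => d.insert p.2 ([] : List Int)) PySem.Dict.empty)).keys.foldl
      (fun m pessoa => aMinnBody m pessoa
        ((s.foldl (fun d p => d.modify p.2 [] (· ++ [p.1]))
          (s.foldl (fun d p => d.insert p.2 ([] : List Int)) PySem.Dict.empty)).getD pessoa []))
      PySem.Dict.empty).items
    = (pvNames s).map (fun n => (n, pvF (pvTimes n s))) := by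
  have hkeys := aGroup_keys s
  have hget : ∀ n, _ = pvTimes n s := fun n => aGroup_getD s n
  generalize hd : (s.foldl (fun d p => d.modify p.2 [] (· ++ [p.1]))
      (s.foldl (fun d p => d.insert p.2 ([] : List Int)) PySem.Dict.empty)) = d at hkeys hget ⊢
  have hstep := PySem.List.foldl_congr_mem d.keys
      (fun m pessoa => aMinnBody m pessoa (d.getD pessoa []))
      (fun m pessoa => m.insert pessoa (pvF (pvTimes pessoa s))) PySem.Dict.empty
      (by
        intro m pessoa hp
        show aMinnBody m pessoa (d.getD pessoa []) = m.insert pessoa (pvF (pvTimes pessoa s))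
        rw [hget pessoa]
        apply aMinnBody_eq
        rw [hkeys] at hp
        intro hnil
        exact (pvTimes_nil_iff pessoa s).1 hnil hp)
  rw [hstep, PySem.Dict.items_foldl_insert_fresh d.keys (fun a => a)
      (fun pessoa => pvF (pvTimes pessoa s)) PySem.Dict.empty
      (by intro a _; simp [PySem.Dict.contains_empty])
      (by simp [hkeys, pvNames, PySem.Set.nodup_ofList])]
  simp [hkeys, show (PySem.Dict.empty : PySem.Dict String Int).items = [] from rfl]

-- ===== B-side invariant =====

theorem bFold_inv (s : List (Int × String)) :
    (s.foldl bStep (PySem.Dict.empty, PySem.Dict.empty, PySem.Dict.empty)).1.items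
        = (pvNames s).map (fun n => (n, pvF (pvTimes n s)))
      ∧ (∀ n, (s.foldl bStep (PySem.Dict.empty, PySem.Dict.empty, PySem.Dict.empty)).2.2.getD n 0
          = ((pvTimes n s).length : Int))
      ∧ (∀ n, (s.foldl bStep (PySem.Dict.empty, PySem.Dict.empty, PySem.Dict.empty)).2.1.getD n 0
          = (pvTimes n s).getLastD 0) := by
  induction s using List.reverseRecOn with
  | nil => exact ⟨rfl, fun n => rfl, fun n => rfl⟩
  | append_singleton s p ih =>
      obtain ⟨hv, hc, hl⟩ := ih
      set st := s.foldl bStep (PySem.Dict.empty, PySem.Dict.empty, PySem.Dict.empty) with hst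
      obtain ⟨t, n0⟩ := p
      have hfold : (s ++ [(t, n0)]).foldl bStep (PySem.Dict.empty, PySem.Dict.empty, PySem.Dict.empty)
          = bStep st (t, n0) := by rw [List.foldl_append]; rfl
      have hvkeys : st.1.keys = pvNames s := by
        show st.1.items.map (·.1) = pvNames s
        rw [hv, List.map_map]; simp [Function.comp_def]
      have hnodup : (pvNames s).Nodup := by
        unfold pvNames; exact PySem.Set.nodup_ofList _
      have hnames : pvNames (s ++ [(t, n0)]) = PySem.Set.add (pvNames s) n0 := by
        simp [pvNames, PySem.Set.ofList_append_singleton]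
      have htimes_ne : ∀ n, n0 ≠ n → pvTimes n (s ++ [(t, n0)]) = pvTimes n s := by
        intro n hne
        rw [pvTimes_append_singleton n s (t, n0)]
        simp [hne]
      have htimes_n0 : pvTimes n0 (s ++ [(t, n0)]) = pvTimes n0 s ++ [t] := by
        rw [pvTimes_append_singleton n0 s (t, n0)]
        simp
      rw [hfold]
      set c0 := st.2.2.getD n0 0 with hc0
      have hc0len : c0 = ((pvTimes n0 s).length : Int) := hc n0
      refine ⟨?_, ?_, ?_⟩
      · -- value items
        show (if c0 = 0 then st.1.insert n0 t
            else if c0 = 1 then st.1.insert n0 (min 100 (t - st.2.1.getD n0 0))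
            else st.1.insert n0 (min (st.1.getD n0 0) (t - st.2.1.getD n0 0))).items
          = (pvNames (s ++ [(t, n0)])).map (fun n => (n, pvF (pvTimes n (s ++ [(t, n0)]))))
        by_cases h0 : c0 = 0
        · have hnil : pvTimes n0 s = [] := by
            have h' := hc0len
            rw [h0] at h'
            exact List.eq_nil_of_length_eq_zero (by exact_mod_cast h'.symm)
          have hnotin : n0 ∉ pvNames s := (pvTimes_nil_iff n0 s).1 hnil
          have hcont : st.1.contains n0 = false := by
            rw [PySem.Dict.contains_eq_decide_mem_keys, hvkeys]
            simp [hnotin]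
          rw [if_pos h0, PySem.Dict.items_insert_of_not_contains _ _ hcont, hv,
            hnames, PySem.Set.add_of_not_mem hnotin, List.map_append]
          congr 1
          · apply List.map_congr_left
            intro n hn
            have hne : n0 ≠ n := fun he => hnotin (he ▸ hn)
            rw [htimes_ne n hne]
          · simp [htimes_n0, hnil, pvF_singleton]
        · have hmem : n0 ∈ pvNames s := by
            by_contra hno
            have hnil := (pvTimes_nil_iff n0 s).2 hno
            exact h0 (by rw [hc0len, hnil]; simp)
          have hcont : st.1.contains n0 = true := by
            rw [PySem.Dict.contains_eq_decide_mem_keys, hvkeys]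
            simp [hmem]
          have hlast : st.2.1.getD n0 0 = (pvTimes n0 s).getLastD 0 := hl n0
          have hnewv : (if c0 = 0 then st.1.insert n0 t
              else if c0 = 1 then st.1.insert n0 (min 100 (t - st.2.1.getD n0 0))
              else st.1.insert n0 (min (st.1.getD n0 0) (t - st.2.1.getD n0 0)))
              = st.1.insert n0 (pvF (pvTimes n0 (s ++ [(t, n0)]))) := by
            rw [if_neg h0]
            by_cases h1 : c0 = 1
            · have hlen : (pvTimes n0 s).length = 1 := by
                have h' := hc0len
                rw [h1] at h'
                exact_mod_cast h'.symm
              obtain ⟨t0, ht0⟩ := List.length_eq_one_iff.1 hlen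
              rw [if_pos h1, hlast, htimes_n0, ht0]
              simp [pvF_pair, List.getLastD]
            · have hlen2 : 2 ≤ (pvTimes n0 s).length := by
                have hne0 : (pvTimes n0 s).length ≠ 0 := fun hh => h0 (by rw [hc0len, hh]; simp)
                have hne1 : (pvTimes n0 s).length ≠ 1 := fun hh => h1 (by rw [hc0len, hh]; simp)
                omega
              have hget : st.1.getD n0 0 = pvF (pvTimes n0 s) :=
                PySem.Dict.getD_of_mem_items st.1
                  (by rw [hv]; exact List.mem_map.2 ⟨n0, hmem, rfl⟩)
                  (by rw [hvkeys]; exact hnodup) 0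
              rw [if_neg h1, htimes_n0, pvF_append _ _ hlen2, ← hget, ← hlast]
          rw [hnewv, PySem.Dict.items_insert_of_contains _ _ hcont, hv,
            hnames, PySem.Set.add_of_mem hmem, List.map_map]
          apply List.map_congr_left
          intro n hn
          simp only [Function.comp_apply]
          by_cases hne : n = n0
          · subst hne; simp
          · rw [if_neg (by simpa using hne), htimes_ne n (fun he => hne he.symm)]
      · -- count
        intro n
        show (st.2.2.insert n0 (c0 + 1)).getD n 0 = ((pvTimes n (s ++ [(t, n0)])).length : Int)
        rw [PySem.Dict.getD_insert]
        by_cases hne : n = n0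
        · subst hne
          rw [if_pos rfl, htimes_n0, hc0len]
          simp only [List.length_append, List.length_cons, List.length_nil]
          push_cast
          ring
        · rw [if_neg hne, htimes_ne n (fun he => hne he.symm), hc n]
      · -- last
        intro n
        show (st.2.1.insert n0 t).getD n 0 = (pvTimes n (s ++ [(t, n0)])).getLastD 0
        rw [PySem.Dict.getD_insert]
        by_cases hne : n = n0
        · subst hne
          rw [if_pos rfl, htimes_n0]
          simp
        · rw [if_neg hne, htimes_ne n (fun he => hne he.symm), hl n]

-- the dict A's per-name pass builds equals B's value dict
theorem dicts_eq (s : List (Int × String)) :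
    ((s.foldl (fun d p => d.modify p.2 [] (· ++ [p.1]))
        (s.foldl (fun d p => d.insert p.2 ([] : List Int)) PySem.Dict.empty)).keys.foldl
      (fun m pessoa => aMinnBody m pessoa
        ((s.foldl (fun d p => d.modify p.2 [] (· ++ [p.1]))
          (s.foldl (fun d p => d.insert p.2 ([] : List Int)) PySem.Dict.empty)).getD pessoa []))
      PySem.Dict.empty)
    = (s.foldl bStep (PySem.Dict.empty, PySem.Dict.empty, PySem.Dict.empty)).1 := by
  apply PySem.Dict.ext
  rw [aMinn_items s, (bFold_inv s).1]

-- ===== VERDICT (by name: the statement is the Claim_ definition above) =====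
theorem formula1_spec : Claim_equal_formula1 := by
  unfold Claim_equal_formula1
  intro log _
  unfold Spec_formula1 formula1 formula1_alt
  by_cases h : log = []
  · simp [h]
  · simp only [if_neg h]
    rw [dicts_eq (PySem.List.sorted2 log (fun x => x.2) (fun x => x.1))]
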